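-- pv_equiv track=rewrite | github.com/Mishaaa057/leetcode | 08242021/l-0766.py | converte_to_matrix
-- ===== SOURCE A (Python) =====
-- def converte_to_matrix(lst):
--
-- 	lst1 = lst[1:]
-- 	lst1 = lst1[:-1]
-- 	# '[4, 3], [5]'
--
--
-- 	matrix = []
-- 	temp_lst = []
--
-- 	for el in lst1:
-- 		if el != '[' and el != ']' and el != ',' and el != ' ':
-- 			temp_lst.append(int(el))
-- 		elif el == ']':
-- 			matrix.append(temp_lst)
-- 			temp_lst = []
--
-- 	return matrix
-- ===== SOURCE B (Python) =====
-- def converte_to_matrix(lst):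
--     lst1 = lst[1:-1]
--     matrix = []
--     for row in lst1.split(']')[:-1]:
--         matrix.append([int(c) for c in row if c not in '[], '])
--     return matrix
-- ===== Notes on version B (the rewrite author's own statement) =====
-- stated objective: simpler
-- what changed: Replaces A's single char-stream loop with manual row-boundary detection and two mutable accumulators by a split-then-parse decomposition: split the stripped string at each closing bracket, drop the last piece, and parse each piece with a filter comprehension.
import Mathlib
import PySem

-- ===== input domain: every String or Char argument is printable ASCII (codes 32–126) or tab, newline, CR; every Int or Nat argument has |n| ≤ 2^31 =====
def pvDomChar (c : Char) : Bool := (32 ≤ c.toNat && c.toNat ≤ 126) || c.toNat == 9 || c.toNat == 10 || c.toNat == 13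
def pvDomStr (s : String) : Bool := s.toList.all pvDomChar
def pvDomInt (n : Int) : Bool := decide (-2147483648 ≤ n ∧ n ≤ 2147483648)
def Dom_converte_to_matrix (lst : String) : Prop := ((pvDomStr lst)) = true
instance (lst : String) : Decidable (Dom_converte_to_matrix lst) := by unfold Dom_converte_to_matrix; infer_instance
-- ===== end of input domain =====

-- B differs from A by a split-then-parse decomposition (objective: simpler); return values proved equal on Pre_.

-- ===== PORT A =====
-- A's loop body: append int(el) for non-delimiter chars, flush temp_lst on ']'.
-- int(el) is PySem.Int.ofChars? [el]; '.getD 0' is total cover for the ValueError case, which Pre_ excludes.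
def pvStepA (st : List (List Int) × List Int) (el : Char) : List (List Int) × List Int :=
  if el ≠ '[' ∧ el ≠ ']' ∧ el ≠ ',' ∧ el ≠ ' ' then
    (st.1, st.2 ++ [(PySem.Int.ofChars? [el]).getD 0])
  else if el = ']' then (st.1 ++ [st.2], ([] : List Int))
  else st

def converte_to_matrix (lst : String) : List (List Int) :=
  let lst1 := PySem.List.slice lst.toList (some 1) none          -- lst[1:]
  let lst2 := PySem.List.slice lst1 none (some (-1))             -- lst1[:-1]
  (lst2.foldl pvStepA (([] : List (List Int)), ([] : List Int))).1

-- ===== PORT B =====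
-- [int(c) for c in row if c not in '[], ']  (same int()-as-ofChars? convention as port A)
def pvParseRow (row : List Char) : List Int :=
  (row.filter (fun c => decide (c ∉ ['[', ']', ',', ' ']))).map
    (fun c => (PySem.Int.ofChars? [c]).getD 0)

def converte_to_matrix_alt (lst : String) : List (List Int) :=
  let lst1 := PySem.List.slice lst.toList (some 1) (some (-1))   -- lst[1:-1]
  ((PySem.Chars.splitOn lst1 [']']).dropLast).map pvParseRow

-- ===== PRECONDITION & SPEC =====
-- Pre_ excludes exactly the inputs where A raises ValueError: a char of the stripped string
-- that is neither one of the four delimiter characters nor a digit makes int(el) raise.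
-- (The ports themselves are total and agree even there, so the proof does not need Pre_;
-- Pre_ only marks where the Python programs return.)
def Pre_converte_to_matrix (lst : String) : Prop :=
  (lst.toList.tail.dropLast.all
    (fun c => c == '[' || c == ']' || c == ',' || c == ' ' || PySem.Chars.isdigit c)) = true
instance (lst : String) : Decidable (Pre_converte_to_matrix lst) := by
  unfold Pre_converte_to_matrix; infer_instance

def pvWitness_converte_to_matrix : String := "[[4, 3], [5]]"

def Spec_converte_to_matrix (lst : String) (out : List (List Int)) : Prop := out = converte_to_matrix_alt lst
instance (lst : String) (out : List (List Int)) : Decidable (Spec_converte_to_matrix lst out) := by unfold Spec_converte_to_matrix; infer_instance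

-- ===== CLAIM (what is proved, stated in full; the proofs are below) =====
def Claim_equal_converte_to_matrix : Prop := ∀ (lst : String), Dom_converte_to_matrix lst → Pre_converte_to_matrix lst → Spec_converte_to_matrix lst (converte_to_matrix lst)

-- ===== LEMMAS AND PROOFS =====

-- Pure recursive description of single-char splitOn (proof-side only).
def pvSplit : List Char → List (List Char)
  | [] => [[]]
  | c :: l => if c = ']' then [] :: pvSplit l else (pvSplit l).modifyHead (c :: ·)

lemma pvSplit_ne_nil (l : List Char) : pvSplit l ≠ [] := by
  induction l with
  | nil => simp [pvSplit]
  | cons c l ih =>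
    by_cases h : c = ']' <;> simp [pvSplit, h]
    cases hS : pvSplit l with
    | nil => exact absurd hS ih
    | cons r rs => simp

lemma pvGo_spec (l : List Char) : ∀ (fuel : Nat) (cur : List Char) (acc : List (List Char)),
    l.length + 1 ≤ fuel →
    PySem.Chars.splitOn.go [']'] fuel l cur acc
      = acc.reverse ++ (pvSplit l).modifyHead (cur.reverse ++ ·) := by
  induction l with
  | nil =>
    intro fuel cur acc h
    obtain ⟨f, rfl⟩ : ∃ f, fuel = f + 1 := ⟨fuel - 1, by omega⟩
    simp [PySem.Chars.splitOn.go, pvSplit]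
  | cons c l ih =>
    intro fuel cur acc h
    obtain ⟨f, rfl⟩ : ∃ f, fuel = f + 1 := ⟨fuel - 1, by omega⟩
    by_cases hc : c = ']'
    · subst hc
      rw [PySem.Chars.splitOn.go]
      simp only [List.isPrefixOf, BEq.rfl, Bool.true_and, if_pos]
      rw [show List.drop [']'].length (']' :: l) = l from rfl]
      rw [ih f [] (cur.reverse :: acc) (by simp at h ⊢; omega)]
      cases hS : pvSplit l with
      | nil => exact absurd hS (pvSplit_ne_nil l)
      | cons r rs => simp [pvSplit, hS]
    · rw [PySem.Chars.splitOn.go]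
      have hpre : [']'].isPrefixOf (c :: l) = false := by
        simp [List.isPrefixOf]; exact fun hh => hc hh.symm
      rw [hpre]
      simp only [Bool.false_eq_true, if_false]
      rw [ih f (c :: cur) acc (by simp at h ⊢; omega)]
      cases hS : pvSplit l with
      | nil => exact absurd hS (pvSplit_ne_nil l)
      | cons r rs => simp [pvSplit, hc, hS]

lemma pvSplitOn_eq (l : List Char) : PySem.Chars.splitOn l [']'] = pvSplit l := by
  rw [PySem.Chars.splitOn, pvGo_spec l (l.length + 1) [] [] (le_refl _)]
  cases hS : pvSplit l with
  | nil => exact absurd hS (pvSplit_ne_nil l)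
  | cons r rs => simp

-- The value of A's loop: rows cut by pvSplit, the first still carrying the pending temp_lst t.
def pvRows (t : List Int) (l : List Char) : List (List Int) :=
  match pvSplit l with
  | [] => []
  | r0 :: rest => (t ++ pvParseRow r0) :: rest.map pvParseRow

lemma pvFoldA (l : List Char) : ∀ (m : List (List Int)) (t : List Int),
    l.foldl pvStepA (m, t) = (m ++ (pvRows t l).dropLast, (pvRows t l).getLastD []) := by
  induction l with
  | nil => intro m t; simp [pvRows, pvSplit, pvParseRow]
  | cons c l ih =>
    intro m t
    rw [List.foldl_cons]
    by_cases hd : c ≠ '[' ∧ c ≠ ']' ∧ c ≠ ',' ∧ c ≠ ' '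
    · rw [show pvStepA (m, t) c = (m, t ++ [(PySem.Int.ofChars? [c]).getD 0]) by
        simp [pvStepA, hd]]
      rw [ih]
      have : pvRows t (c :: l) = pvRows (t ++ [(PySem.Int.ofChars? [c]).getD 0]) l := by
        unfold pvRows
        cases hS : pvSplit l with
        | nil => exact absurd hS (pvSplit_ne_nil l)
        | cons r rs => simp [pvSplit, hd.2.1, hS, pvParseRow, hd]
      rw [this]
    · by_cases hc : c = ']'
      · subst hc
        rw [show pvStepA (m, t) ']' = (m ++ [t], ([] : List Int)) by simp [pvStepA]]
        rw [ih]
        have hR : pvRows t (']' :: l) = t :: pvRows [] l := by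
          unfold pvRows
          cases hS : pvSplit l with
          | nil => exact absurd hS (pvSplit_ne_nil l)
          | cons r rs => simp [pvSplit, hS, pvParseRow]
        have hne : pvRows [] l ≠ [] := by
          unfold pvRows
          cases hS : pvSplit l with
          | nil => exact absurd hS (pvSplit_ne_nil l)
          | cons r rs => simp
        rw [hR]
        cases hP : pvRows [] l with
        | nil => exact absurd hP hne
        | cons p ps => simp
      · have hdelim : c = '[' ∨ c = ',' ∨ c = ' ' := by
          push Not at hd
          rcases eq_or_ne c '[' with h | h1
          · exact Or.inl h
          rcases eq_or_ne c ',' with h | h2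
          · exact Or.inr (Or.inl h)
          exact Or.inr (Or.inr (hd h1 hc h2))
        rw [show pvStepA (m, t) c = (m, t) by
          rcases hdelim with h | h | h <;> subst h <;> simp [pvStepA]]
        rw [ih]
        have : pvRows t (c :: l) = pvRows t l := by
          unfold pvRows
          cases hS : pvSplit l with
          | nil => exact absurd hS (pvSplit_ne_nil l)
          | cons r rs =>
            rcases hdelim with h | h | h <;> subst h <;> simp [pvSplit, hS, pvParseRow]
        rw [this]

lemma pvSlice_eq (xs : List Char) :
    PySem.List.slice xs (some 1) (some (-1))
      = PySem.List.slice (PySem.List.slice xs (some 1) none) none (some (-1)) := by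
  simp only [PySem.List.slice, PySem.List.clampIdx]
  norm_num
  cases xs with
  | nil => simp
  | cons x t =>
    rw [List.take_take]
    congr 1
    simp only [List.length_cons, reduceCtorEq, if_false]
    split_ifs with h <;> push_cast at h ⊢ <;> omega

-- ===== VERDICT (by name: the statement is the Claim_ definition above) =====
theorem converte_to_matrix_spec : Claim_equal_converte_to_matrix := by
  intro lst _ _
  show (List.foldl pvStepA ([], [])
      (PySem.List.slice (PySem.List.slice lst.toList (some 1) none) none (some (-1)))).1
    = ((PySem.Chars.splitOn (PySem.List.slice lst.toList (some 1) (some (-1))) [']']).dropLast).map pvParseRow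
  rw [← pvSlice_eq]
  rw [pvFoldA]
  rw [pvSplitOn_eq]
  unfold pvRows
  cases hS : pvSplit (PySem.List.slice lst.toList (some 1) (some (-1))) with
  | nil => exact absurd hS (pvSplit_ne_nil _)
  | cons r rs => simp [List.map_dropLast]
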